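-- pv_equiv track=rewrite | github.com/chris-henry-holland/python-ProjectEulerSolutions | venv/lib/python3.11/site-packages/data_structures/prime_sieves.py | largestLEpowN
-- ===== SOURCE A (Python) =====
-- from typing import (
--     Generator,
--     Dict,
--     List,
--     Set,
--     Tuple,
--     Optional,
--     Union,
-- )
-- import bisect
--
-- def largestLEpowN(
--     num: Union[int, float],
--     base: int=10,
-- ) -> int:
--     if num <= base: return 1
--     base_lst = [base]
--     while base_lst[-1] < num:
--         base_lst.append(base_lst[-1] ** 2)
--     if num == base_lst[-1]: return 1 << (len(base_lst) - 1)
--     base_lst.pop()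
--     i = len(base_lst) - 1
--     num //= pow(base, 1 << i)
--     res = 1 << i
--     while num >= base:
--         i = bisect.bisect_right(base_lst, num) - 1
--         num //= pow(base, 1 << i)
--         res |= 1 << i
--     return res
-- ===== SOURCE B (Python) =====
-- def largestLEpowN(num, base=10):
--     # Linear multiply-and-count integer logarithm (assumes base >= 2 when num > base).
--     if num <= base:
--         return 1
--     p = base
--     res = 1
--     while p * base <= num:
--         p *= base
--         res += 1
--     return res
-- ===== Notes on version B (the rewrite author's own statement) =====
-- stated objective: simpler
-- what changed: Replaces A's repeated-squaring power table plus bisect-driven binary decomposition of the exponent with a single linear multiply-and-count loop over exponents.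
-- outside the precondition, e.g. on largestLEpowN(4, -2): A returns 2, B returns 3; on largestLEpowN(16, -2): A returns 4, B returns 5; on largestLEpowN(5, -2): A does not finish within the time limit, B returns 3
import Mathlib
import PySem

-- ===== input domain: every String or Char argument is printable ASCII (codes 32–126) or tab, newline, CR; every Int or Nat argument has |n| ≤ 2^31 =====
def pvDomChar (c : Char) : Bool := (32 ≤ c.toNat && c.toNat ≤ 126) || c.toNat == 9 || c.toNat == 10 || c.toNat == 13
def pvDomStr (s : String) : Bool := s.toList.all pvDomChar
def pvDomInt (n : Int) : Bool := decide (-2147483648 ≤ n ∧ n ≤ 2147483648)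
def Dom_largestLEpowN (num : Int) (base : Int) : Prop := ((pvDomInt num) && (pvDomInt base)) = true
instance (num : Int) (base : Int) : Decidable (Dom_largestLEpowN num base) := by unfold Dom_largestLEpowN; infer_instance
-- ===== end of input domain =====

-- B replaces A's repeated-squaring table + bisect binary exponent decomposition by a plain
-- multiply-and-count loop over exponents; same values on Pre_, no speed claim.


-- ===== PORT A =====
-- `base_lst = [base]; while base_lst[-1] < num: base_lst.append(base_lst[-1] ** 2)`,
-- carrying the last element; fuel 64 is enough for every input admitted by Dom ∧ Pre_.
def pvBuildA (num : Int) : Nat → Int → List Int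
  | 0, last => [last]
  | fuel + 1, last => if last < num then last :: pvBuildA num fuel (last * last) else [last]

-- `while num >= base: i = bisect.bisect_right(base_lst, num) - 1; num //= pow(base, 1 << i); res |= 1 << i`
def pvLoopA (base : Int) (lst : List Int) : Nat → Int → Int → Int
  | 0, _, res => res
  | fuel + 1, num, res =>
    if base ≤ num then
      let i : Nat := PySem.List.bisectRight lst num - 1
      pvLoopA base lst fuel (PySem.Int.floordiv num (base ^ (1 <<< i)))
        (PySem.Int.bor res ((1 : Int) <<< i))
    else res

def largestLEpowN (num : Int) (base : Int) : Int :=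
  if num ≤ base then 1
  else
    let baseLst := pvBuildA num 64 base
    if num = baseLst.getLast! then (1 : Int) <<< (baseLst.length - 1)
    else
      let lst := baseLst.dropLast
      let i : Nat := lst.length - 1
      pvLoopA base lst 64 (PySem.Int.floordiv num (base ^ (1 <<< i))) ((1 : Int) <<< i)

-- ===== PORT B =====
-- `p = base; res = 1; while p * base <= num: p *= base; res += 1`; fuel 64 is enough on Dom ∧ Pre_.
def pvLoopB (num base : Int) : Nat → Int → Int → Int
  | 0, _, res => res
  | fuel + 1, p, res => if p * base ≤ num then pvLoopB num base fuel (p * base) (res + 1) else res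

def largestLEpowN_alt (num : Int) (base : Int) : Int :=
  if num ≤ base then 1 else pvLoopB num base 64 base 1

-- ===== PRECONDITION & SPEC =====
-- Pre_ excludes base < 2 with num > base: there A diverges for almost all inputs (base 0, 1 and most
-- negative bases), and the scattered negative-base inputs hitting an exact power of base² on which it
-- does return get a value read off its squaring table that is an artifact of that table.
def Pre_largestLEpowN (num : Int) (base : Int) : Prop := num ≤ base ∨ 2 ≤ base
instance (num : Int) (base : Int) : Decidable (Pre_largestLEpowN num base) := by
  unfold Pre_largestLEpowN; infer_instance

def pvWitness_largestLEpowN : Int × Int := (100, 10)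

def Spec_largestLEpowN (num : Int) (base : Int) (out : Int) : Prop := out = largestLEpowN_alt num base
instance (num : Int) (base : Int) (out : Int) : Decidable (Spec_largestLEpowN num base out) := by
  unfold Spec_largestLEpowN; infer_instance

-- ===== CLAIM (what is proved, stated in full; the proofs are below) =====
def Claim_equal_largestLEpowN : Prop := ∀ (num : Int) (base : Int), Dom_largestLEpowN num base →
  Pre_largestLEpowN num base → Spec_largestLEpowN num base (largestLEpowN num base)

-- ===== LEMMAS AND PROOFS =====

/-- `b ^ (2^j)`: the j-th entry of A's squaring table. -/
def pvPw (b : Int) (j : Nat) : Int := b ^ (2 ^ j)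

theorem pvPw_succ (b : Int) (j : Nat) : pvPw b (j + 1) = pvPw b j * pvPw b j := by
  unfold pvPw
  rw [← pow_add]
  congr 1
  omega

theorem pvPw_pos {b : Int} (hb : 2 ≤ b) (j : Nat) : 0 < pvPw b j :=
  pow_pos (by omega) _

theorem pvPw_lt_pvPw {b : Int} (hb : 2 ≤ b) {i j : Nat} (h : i < j) : pvPw b i < pvPw b j := by
  exact pow_lt_pow_right₀ (by omega) (Nat.pow_lt_pow_right (by omega) h)

theorem pvLor_hi_lo (k a b : Nat) (h : b < 2 ^ k) : (2 ^ k * a) ||| b = 2 ^ k * a + b := by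
  induction k generalizing b with
  | zero => interval_cases b; simp
  | succ k ih =>
    have hb2 : b / 2 < 2 ^ k := by omega
    have h1 : 2 ^ (k + 1) * a = Nat.bit false (2 ^ k * a) := by simp [Nat.bit]; ring
    have h2 : b = Nat.bit (b % 2 == 1) (b / 2) := by
      rcases Nat.mod_two_eq_zero_or_one b with h | h <;> simp [Nat.bit, h] <;> omega
    rw [h1, h2, Nat.lor_bit, ih _ hb2]
    rcases Nat.mod_two_eq_zero_or_one b with h | h <;> simp [Nat.bit, h] <;> ring_nf

theorem pvBor_pow {i e : Nat} (c : Int) (hc : 0 ≤ c) (h : i < e) :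
    PySem.Int.bor (2 ^ e * c) (2 ^ i) = 2 ^ e * c + 2 ^ i := by
  obtain ⟨cn, rfl⟩ := Int.eq_ofNat_of_zero_le hc
  have h1 : (2 ^ e * (cn : Int)) = ((2 ^ e * cn : Nat) : Int) := by push_cast; ring
  have h2 : ((2 : Int) ^ i) = ((2 ^ i : Nat) : Int) := by push_cast; ring
  rw [h1, h2, PySem.Int.bor_natCast, pvLor_hi_lo e cn (2 ^ i)
    (Nat.pow_lt_pow_right (by omega) h)]
  push_cast; ring

theorem pvBuildA_eq (num b : Int) :
    ∀ (fuel j K : Nat), j ≤ K → K < j + fuel → num ≤ pvPw b K →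
    (∀ t, j ≤ t → t < K → pvPw b t < num) →
    pvBuildA num fuel (pvPw b j) = (List.range (K - j + 1)).map (fun t => pvPw b (j + t)) := by
  intro fuel
  induction fuel with
  | zero => intro j K h1 h2; omega
  | succ f ih =>
    intro j K h1 h2 hK hmin
    simp only [pvBuildA]
    rcases eq_or_lt_of_le h1 with rfl | hjK
    · rw [if_neg (not_lt.mpr hK)]
      simp
    · rw [if_pos (hmin j le_rfl hjK), ← pvPw_succ,
        ih (j + 1) K hjK (by omega) hK (fun t ht1 ht2 => hmin t (by omega) ht2)]
      rw [show K - j + 1 = (K - (j + 1) + 1) + 1 by omega]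
      conv_rhs => rw [List.range_succ_eq_map]
      rw [List.map_cons, List.map_map]
      congr 1
      simp only [List.map_inj_left, Function.comp]
      intro t _
      congr 1
      omega

theorem pvGetLast!_map_range (f : Nat → Int) (n : Nat) :
    ((List.range (n + 1)).map f).getLast! = f n := by
  simp [List.range_succ]

theorem pvLoopA_spec (b : Int) (hb : 2 ≤ b) (K : Nat) :
    ∀ (fuel e : Nat) (num c : Int), e ≤ fuel → e < K →
    1 ≤ num → num < pvPw b e → 0 ≤ c →
    ∃ m : Nat, b ^ m ≤ num ∧ num < b ^ (m + 1) ∧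
      pvLoopA b ((List.range K).map (pvPw b)) fuel num (2 ^ e * c) = 2 ^ e * c + m := by
  intro fuel
  induction fuel with
  | zero =>
    intro e num c he heK h1 h2 hc
    have he0 : e = 0 := Nat.le_zero.mp he
    subst he0
    exact ⟨0, by simpa using h1, by simpa [pvPw] using h2, by simp [pvLoopA]⟩
  | succ f ih =>
    intro e num c he heK h1 h2 hc
    by_cases hge : b ≤ num
    · have he1 : 1 ≤ e := by
        by_contra h
        have he0 : e = 0 := by omega
        subst he0
        have : num < b := by simpa [pvPw] using h2
        omega
      set lst := (List.range K).map (pvPw b) with hlst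
      have hsorted : List.Pairwise (fun x1 x2 => x1 ≤ x2) lst := by
        rw [hlst, List.pairwise_map]
        exact List.pairwise_lt_range.imp (fun h => le_of_lt (pvPw_lt_pvPw hb h))
      have hget : ∀ (j : Nat) (hj : j < lst.length), lst[j] = pvPw b j := by
        intro j hj; simp [hlst]
      have hlen : lst.length = K := by simp [hlst]
      obtain ⟨hL1, hL2, hL3⟩ := PySem.List.bisectRight_spec lst num hsorted
      set L := PySem.List.bisectRight lst num with hLdef
      have hLpos : 1 ≤ L := by
        by_contra h
        have h3 := hL3 0 (by omega) (by omega)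
        rw [hget 0 (by omega)] at h3
        have hpw0 : pvPw b 0 = b := by simp [pvPw]
        omega
      have hLe : L ≤ e := by
        by_contra h
        have h3 := hL2 e (by omega) (by omega)
        rw [hget e (by omega)] at h3
        omega
      have hiK : L - 1 < K := by omega
      have hple : pvPw b (L - 1) ≤ num := by
        have h3 := hL2 (L - 1) (by omega) (by omega)
        rwa [hget (L - 1) (by omega)] at h3
      have hplt : num < pvPw b (L - 1 + 1) := by
        have h3 := hL3 (L - 1 + 1) (by omega) (by omega)
        rwa [hget (L - 1 + 1) (by omega)] at h3
      have hpw_pos : 0 < pvPw b (L - 1) := pvPw_pos hb _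
      have hpow_eq : b ^ ((1 : Nat) <<< (L - 1)) = pvPw b (L - 1) := by
        rw [Nat.one_shiftLeft]; rfl
      set num' := PySem.Int.floordiv num (b ^ ((1 : Nat) <<< (L - 1))) with hnum'
      have h1' : 1 ≤ num' := by
        rw [hnum', hpow_eq]
        exact (PySem.Int.le_floordiv_iff_mul_le hpw_pos).mpr (by simpa using hple)
      have h2' : num' < pvPw b (L - 1) := by
        rw [hnum', hpow_eq]
        refine (PySem.Int.floordiv_lt_iff_lt_mul hpw_pos).mpr ?_
        rw [← pvPw_succ]
        exact hplt
      have hdle : num' * pvPw b (L - 1) ≤ num :=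
        (PySem.Int.le_floordiv_iff_mul_le hpw_pos).mp (by rw [hnum', hpow_eq])
      have hdlt : num < (num' + 1) * pvPw b (L - 1) :=
        (PySem.Int.floordiv_lt_iff_lt_mul hpw_pos).mp (by rw [hnum', hpow_eq]; omega)
      have hbor : PySem.Int.bor (2 ^ e * c) ((1 : Int) <<< (L - 1))
          = 2 ^ (L - 1) * (2 ^ (e - (L - 1)) * c + 1) := by
        rw [show (1 : Int) <<< (L - 1) = 2 ^ (L - 1) by simp [Int.shiftLeft_eq],
          pvBor_pow c hc (by omega : L - 1 < e)]
        rw [show (2 : Int) ^ e = 2 ^ (L - 1) * 2 ^ (e - (L - 1)) by rw [← pow_add]; congr 1; omega]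
        ring
      obtain ⟨m, hm1, hm2, heq⟩ := ih (L - 1) num' (2 ^ (e - (L - 1)) * c + 1)
        (by omega) (by omega) h1' h2' (by positivity)
      refine ⟨2 ^ (L - 1) + m, ?_, ?_, ?_⟩
      · rw [pow_add]
        calc b ^ 2 ^ (L - 1) * b ^ m ≤ b ^ 2 ^ (L - 1) * num' :=
              mul_le_mul_of_nonneg_left hm1 (le_of_lt (pvPw_pos hb (L - 1)))
          _ = num' * pvPw b (L - 1) := by rw [pvPw]; ring
          _ ≤ num := hdle
      · calc num < (num' + 1) * pvPw b (L - 1) := hdlt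
          _ ≤ b ^ (m + 1) * pvPw b (L - 1) := by
              apply mul_le_mul_of_nonneg_right (by omega) (le_of_lt hpw_pos)
          _ = b ^ (2 ^ (L - 1) + m + 1) := by
              rw [pvPw, ← pow_add]; congr 1; omega
      · simp only [pvLoopA, if_pos hge]
        rw [← hLdef, ← hnum', hbor, heq]
        push_cast
        rw [show (2 : Int) ^ e = 2 ^ (L - 1) * 2 ^ (e - (L - 1)) by rw [← pow_add]; congr 1; omega]
        ring
    · exact ⟨0, by simpa using h1, by simpa [pvPw] using (by omega : num < b),
        by simp only [pvLoopA, if_neg hge]; simp⟩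

theorem pvA_log (num b : Int) (hb : 2 ≤ b) (hlt : b < num) (hnum : num ≤ 2 ^ 31) :
    ∃ m : Nat, b ^ m ≤ num ∧ num < b ^ (m + 1) ∧ largestLEpowN num b = (m : Int) := by
  have hex : ∃ K, num ≤ pvPw b K := by
    refine ⟨32, ?_⟩
    have e1 : (2 : Int) ^ (2 ^ 32 : Nat) ≤ b ^ (2 ^ 32 : Nat) :=
      pow_le_pow_left₀ (by norm_num) (by omega) _
    have e2 : (2 : Int) ^ (31 : Nat) ≤ 2 ^ (2 ^ 32 : Nat) :=
      pow_le_pow_right₀ (by norm_num) (by norm_num)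
    calc num ≤ 2 ^ (31 : Nat) := hnum
      _ ≤ 2 ^ (2 ^ 32 : Nat) := e2
      _ ≤ b ^ (2 ^ 32 : Nat) := e1
  have hKle : num ≤ pvPw b (Nat.find hex) := Nat.find_spec hex
  set K := Nat.find hex with hKdef
  have hmin : ∀ t, t < K → pvPw b t < num := by
    intro t ht
    have := Nat.find_min hex ht
    omega
  have hK32 : K ≤ 32 := Nat.find_le (by
    have e1 : (2 : Int) ^ (2 ^ 32 : Nat) ≤ b ^ (2 ^ 32 : Nat) :=
      pow_le_pow_left₀ (by norm_num) (by omega) _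
    have e2 : (2 : Int) ^ (31 : Nat) ≤ 2 ^ (2 ^ 32 : Nat) :=
      pow_le_pow_right₀ (by norm_num) (by norm_num)
    calc num ≤ 2 ^ (31 : Nat) := hnum
      _ ≤ 2 ^ (2 ^ 32 : Nat) := e2
      _ ≤ b ^ (2 ^ 32 : Nat) := e1)
  have hpw0 : pvPw b 0 = b := by simp [pvPw]
  have hK1 : 1 ≤ K := by
    by_contra h
    have h0 : K = 0 := by omega
    rw [h0, hpw0] at hKle
    omega
  have hbuild : pvBuildA num 64 b = (List.range (K + 1)).map (pvPw b) := by
    have h := pvBuildA_eq num b 64 0 K (by omega) (by omega) hKle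
      (fun t _ ht => hmin t ht)
    rw [hpw0] at h
    simpa using h
  have hgl : (pvBuildA num 64 b).getLast! = pvPw b K := by
    rw [hbuild]; exact pvGetLast!_map_range _ K
  have hlenB : (pvBuildA num 64 b).length = K + 1 := by rw [hbuild]; simp
  have hdrop : (pvBuildA num 64 b).dropLast = (List.range K).map (pvPw b) := by
    rw [hbuild, List.range_succ, List.map_append]
    simp
  by_cases hcase : num = pvPw b K
  · refine ⟨2 ^ K, ?_, ?_, ?_⟩
    · rw [hcase]; exact le_of_eq rfl
    · rw [hcase, pow_succ]
      have : (1 : Int) < b := by omega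
      calc pvPw b K = pvPw b K * 1 := by ring
        _ < b ^ (2 ^ K : Nat) * b := by
            apply mul_lt_mul_of_pos_left this (pvPw_pos hb K)
    · unfold largestLEpowN
      rw [if_neg (by omega)]
      simp only [hgl, hlenB, if_pos hcase, Nat.add_sub_cancel]
      rw [Int.shiftLeft_eq]
      push_cast
      ring
  · have hlt2 : num < pvPw b K := lt_of_le_of_ne hKle hcase
    have hplt : pvPw b (K - 1) < num := hmin (K - 1) (by omega)
    have hpw_pos : 0 < pvPw b (K - 1) := pvPw_pos hb _
    have hpe : b ^ ((1 : Nat) <<< (K - 1)) = pvPw b (K - 1) := by rw [Nat.one_shiftLeft]; rfl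
    set num1 := PySem.Int.floordiv num (b ^ ((1 : Nat) <<< (K - 1))) with hnum1
    have h1' : 1 ≤ num1 := by
      rw [hnum1, hpe]
      exact (PySem.Int.le_floordiv_iff_mul_le hpw_pos).mpr (by omega)
    have h2' : num1 < pvPw b (K - 1) := by
      rw [hnum1, hpe]
      refine (PySem.Int.floordiv_lt_iff_lt_mul hpw_pos).mpr ?_
      rw [← pvPw_succ]
      rw [show K - 1 + 1 = K by omega]
      exact hlt2
    have hdle : num1 * pvPw b (K - 1) ≤ num :=
      (PySem.Int.le_floordiv_iff_mul_le hpw_pos).mp (by rw [hnum1, hpe])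
    have hdlt : num < (num1 + 1) * pvPw b (K - 1) :=
      (PySem.Int.floordiv_lt_iff_lt_mul hpw_pos).mp (by rw [hnum1, hpe]; omega)
    obtain ⟨m, hm1, hm2, heq2⟩ := pvLoopA_spec b hb K 64 (K - 1) num1 1
      (by omega) (by omega) h1' h2' (by omega)
    refine ⟨2 ^ (K - 1) + m, ?_, ?_, ?_⟩
    · rw [pow_add]
      calc b ^ (2 ^ (K - 1) : Nat) * b ^ m ≤ b ^ (2 ^ (K - 1) : Nat) * num1 :=
            mul_le_mul_of_nonneg_left hm1 (le_of_lt (pvPw_pos hb (K - 1)))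
        _ = num1 * pvPw b (K - 1) := by rw [pvPw]; ring
        _ ≤ num := hdle
    · calc num < (num1 + 1) * pvPw b (K - 1) := hdlt
        _ ≤ b ^ (m + 1) * pvPw b (K - 1) := by
            apply mul_le_mul_of_nonneg_right (by omega) (le_of_lt hpw_pos)
        _ = b ^ (2 ^ (K - 1) + m + 1 : Nat) := by rw [pvPw, ← pow_add]; congr 1; omega
    · unfold largestLEpowN
      rw [if_neg (by omega)]
      simp only [hgl, hdrop, hlenB, if_neg hcase, List.length_map, List.length_range]
      rw [show (1 : Int) <<< (K - 1) = 2 ^ (K - 1) * 1 by rw [Int.shiftLeft_eq]; ring]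
      rw [← hnum1, heq2]
      push_cast
      ring

theorem pvLoopB_spec (num b : Int) :
    ∀ (fuel r : Nat), b ^ r ≤ num → num < b ^ (r + fuel) →
    ∃ m : Nat, b ^ m ≤ num ∧ num < b ^ (m + 1) ∧ pvLoopB num b fuel (b ^ r) (r : Int) = (m : Int) := by
  intro fuel
  induction fuel with
  | zero =>
    intro r h1 h2
    rw [Nat.add_zero] at h2
    exact absurd h2 (not_lt.mpr h1)
  | succ f ih =>
    intro r h1 h2
    simp only [pvLoopB]
    by_cases hstep : b ^ r * b ≤ num
    · have hs : b ^ (r + 1) ≤ num := by rw [pow_succ]; exact hstep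
      obtain ⟨m, hm1, hm2, heq⟩ := ih (r + 1) hs
        (by rw [show r + 1 + f = r + (f + 1) by omega]; exact h2)
      refine ⟨m, hm1, hm2, ?_⟩
      rw [if_pos hstep, ← pow_succ]
      rw [show ((r : Int) + 1) = ((r + 1 : Nat) : Int) by push_cast; ring]
      exact heq
    · exact ⟨r, h1, by rw [pow_succ]; omega, by rw [if_neg hstep]⟩

theorem pvB_log (num b : Int) (hb : 2 ≤ b) (hlt : b < num) (hnum : num ≤ 2 ^ 31) :
    ∃ m : Nat, b ^ m ≤ num ∧ num < b ^ (m + 1) ∧ largestLEpowN_alt num b = (m : Int) := by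
  have h1 : b ^ 1 ≤ num := by rw [pow_one]; omega
  have h2 : num < b ^ (1 + 64) := by
    have e1 : (2 : Int) ^ 65 ≤ b ^ 65 := pow_le_pow_left₀ (by norm_num) (by omega) 65
    have e2 : (2 : Int) ^ 31 < 2 ^ 65 := by norm_num
    calc num ≤ 2 ^ 31 := hnum
      _ < 2 ^ 65 := e2
      _ ≤ b ^ 65 := e1
  obtain ⟨m, hm1, hm2, heq⟩ := pvLoopB_spec num b 64 1 h1 h2
  refine ⟨m, hm1, hm2, ?_⟩
  unfold largestLEpowN_alt
  rw [if_neg (by omega)]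
  rw [pow_one] at heq
  simpa using heq

theorem pvLog_unique (num b : Int) (hb : 2 ≤ b) {m m' : Nat}
    (h1 : b ^ m ≤ num) (h2 : num < b ^ (m + 1)) (h3 : b ^ m' ≤ num) (h4 : num < b ^ (m' + 1)) :
    m = m' := by
  have hb1 : (1 : Int) < b := by omega
  have a1 : b ^ m < b ^ (m' + 1) := lt_of_le_of_lt h1 h4
  have a2 : b ^ m' < b ^ (m + 1) := lt_of_le_of_lt h3 h2
  rw [pow_lt_pow_iff_right₀ hb1] at a1 a2
  omega

-- ===== VERDICT (by name: the statement is the Claim_ definition above) =====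
theorem largestLEpowN_spec : Claim_equal_largestLEpowN := by
  intro num base hdom hpre
  unfold Spec_largestLEpowN
  by_cases hnb : num ≤ base
  · simp [largestLEpowN, largestLEpowN_alt, hnb]
  · have hb : 2 ≤ base := by
      rcases hpre with h | h
      · exact absurd h hnb
      · exact h
    have hlt : base < num := by omega
    have hnum : num ≤ 2 ^ 31 := by
      unfold Dom_largestLEpowN pvDomInt at hdom
      simp only [Bool.and_eq_true, decide_eq_true_eq] at hdom
      omega
    obtain ⟨m, hm1, hm2, hmA⟩ := pvA_log num base hb hlt hnum
    obtain ⟨m', hn1, hn2, hmB⟩ := pvB_log num base hb hlt hnum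
    rw [hmA, hmB, pvLog_unique num base hb hm1 hm2 hn1 hn2]
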